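-- pv_equiv track=rewrite | github.com/mindu2kk/CodePTIT-Python | bai126sotanggiam.py | check
-- ===== SOURCE A (Python) =====
-- def check(s):
--     n = len(s)
--     if n < 3:
--         return "NO"
--     for i in range(0,n - 1):
--         if all(s[j] < s[j + 1] for j in range(i)) and all(s[j] > s[j + 1] for j in range (i,n - 1)):
--             return "YES"
--     return "NO"
-- ===== SOURCE B (Python) =====
-- def check(s):
--     n = len(s)
--     if n < 3:
--         return "NO"
--     i = 0
--     while i < n - 1 and s[i] < s[i + 1]:
--         i += 1
--     if i == n - 1:
--         return "NO"
--     while i < n - 1 and s[i] > s[i + 1]: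
--         i += 1
--     return "YES" if i == n - 1 else "NO"
-- ===== Notes on version B (the rewrite author's own statement) =====
-- stated objective: faster
-- what changed: A tries every candidate peak i and re-scans the whole list with two all(...) generators for each; B makes a single pass: one while loop climbs the strictly-increasing prefix, a second descends, and the answer is YES iff the descent reaches the last index and the climb did not.
import Mathlib
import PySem

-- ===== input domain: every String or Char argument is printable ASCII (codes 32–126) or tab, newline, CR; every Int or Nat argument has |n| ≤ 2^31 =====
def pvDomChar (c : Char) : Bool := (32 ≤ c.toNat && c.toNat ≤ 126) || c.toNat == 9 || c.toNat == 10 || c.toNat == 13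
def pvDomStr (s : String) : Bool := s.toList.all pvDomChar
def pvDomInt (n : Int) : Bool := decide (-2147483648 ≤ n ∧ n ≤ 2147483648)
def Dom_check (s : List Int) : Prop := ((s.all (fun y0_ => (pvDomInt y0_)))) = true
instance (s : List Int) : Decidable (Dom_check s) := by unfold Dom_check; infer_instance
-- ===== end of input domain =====

-- B replaces A's O(n^2) scan over every candidate peak by one O(n) climb up then down; faster (asymptotic).

-- ===== PORT A =====
-- literal port: for i in range(0, n-1): if all(s[j]<s[j+1] for j in range(i)) and
-- all(s[j]>s[j+1] for j in range(i, n-1)): return "YES"; return "NO"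
-- (indices used by A are always in range; pyGetD is exact there)
def check (s : List Int) : String :=
  if (s.length : Int) < 3 then "NO"
  else if (PySem.List.pyRange 0 ((s.length : Int) - 1) 1).any (fun i =>
      (PySem.List.pyRange 0 i 1).all
        (fun j => PySem.List.pyGetD s j 0 < PySem.List.pyGetD s (j + 1) 0) &&
      (PySem.List.pyRange i ((s.length : Int) - 1) 1).all
        (fun j => PySem.List.pyGetD s j 0 > PySem.List.pyGetD s (j + 1) 0))
  then "YES" else "NO"

-- ===== PORT B =====
-- first while loop of Source B: climb while i < n-1 and s[i] < s[i+1]  (i stays in range, getD is exact)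
def upRun (s : List Int) (i : Nat) : Nat :=
  if _h : i < s.length - 1 then
    if s.getD i 0 < s.getD (i + 1) 0 then upRun s (i + 1) else i
  else i
termination_by s.length - i

-- second while loop of Source B: descend while i < n-1 and s[i] > s[i+1]
def downRun (s : List Int) (i : Nat) : Nat :=
  if _h : i < s.length - 1 then
    if s.getD i 0 > s.getD (i + 1) 0 then downRun s (i + 1) else i
  else i
termination_by s.length - i

def check_alt (s : List Int) : String :=
  let n := s.length
  if n < 3 then "NO"
  else
    let i := upRun s 0
    if i = n - 1 then "NO"
    else if downRun s i = n - 1 then "YES" else "NO"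

-- ===== PRECONDITION & SPEC =====
def Spec_check (s : List Int) (out : String) : Prop := out = check_alt s
instance (s : List Int) (out : String) : Decidable (Spec_check s out) := by unfold Spec_check; infer_instance

-- ===== CLAIM (what is proved, stated in full; the proofs are below) =====
def Claim_equal_check : Prop := ∀ (s : List Int), Dom_check s → Spec_check s (check s)

-- ===== LEMMAS AND PROOFS =====

-- strictly increasing up to p / strictly decreasing from p, over getD indexing
def incP (s : List Int) (p : Nat) : Prop := ∀ j, j < p → s.getD j 0 < s.getD (j + 1) 0
def decP (s : List Int) (p : Nat) : Prop := ∀ j, p ≤ j → j < s.length - 1 → s.getD (j + 1) 0 < s.getD j 0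

lemma upRun_le (s : List Int) (i : Nat) (h : i ≤ s.length - 1) : upRun s i ≤ s.length - 1 := by
  fun_induction upRun s i with
  | case1 i h1 h2 ih => exact ih (by omega)
  | case2 i h1 h2 => exact h
  | case3 i h1 => exact h

lemma upRun_inc (s : List Int) (i : Nat) :
    ∀ j, i ≤ j → j < upRun s i → s.getD j 0 < s.getD (j + 1) 0 := by
  fun_induction upRun s i with
  | case1 i h1 h2 ih =>
      intro j hij hj
      rcases Nat.eq_or_lt_of_le hij with rfl | hlt
      · exact h2
      · exact ih j hlt hj
  | case2 i h1 h2 => intro j hij hj; omega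
  | case3 i h1 => intro j hij hj; omega

lemma upRun_eq_of (s : List Int) (m : Nat) (hm : m ≤ s.length - 1)
    (hstop : m < s.length - 1 → ¬ s.getD m 0 < s.getD (m + 1) 0) :
    ∀ k i, m - i = k → i ≤ m → (∀ j, i ≤ j → j < m → s.getD j 0 < s.getD (j + 1) 0) →
      upRun s i = m := by
  intro k
  induction k with
  | zero =>
      intro i hk him hinc
      have : i = m := by omega
      subst this
      rw [upRun]
      split_ifs with h1 h2
      · exact absurd h2 (hstop h1)
      · rfl
      · rfl
  | succ k ih =>
      intro i hk him hinc
      have hi : i < m := by omega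
      rw [upRun]
      split_ifs with h1 h2
      · exact ih (i + 1) (by omega) (by omega) (fun j hj hjm => hinc j (by omega) hjm)
      · exact absurd (hinc i le_rfl hi) h2
      · omega

lemma downRun_eq_of (s : List Int) :
    ∀ k i, s.length - 1 - i = k → i ≤ s.length - 1 → decP s i → downRun s i = s.length - 1 := by
  intro k
  induction k with
  | zero =>
      intro i hk him _
      have : i = s.length - 1 := by omega
      subst this
      rw [downRun, dif_neg (by omega : ¬ (s.length - 1 < s.length - 1))]
  | succ k ih =>
      intro i hk him hdec
      have hi : i < s.length - 1 := by omega
      rw [downRun, dif_pos hi, if_pos (hdec i le_rfl hi)]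
      exact ih (i + 1) (by omega) (by omega) (fun j hj hjm => hdec j (by omega) hjm)

lemma downRun_dec (s : List Int) (i : Nat) (him : i ≤ s.length - 1)
    (h : downRun s i = s.length - 1) : decP s i := by
  fun_induction downRun s i with
  | case1 i h1 h2 ih =>
      intro j hij hj
      rcases Nat.eq_or_lt_of_le hij with rfl | hlt
      · exact h2
      · exact ih (by omega) h j hlt hj
  | case2 i h1 h2 => intro j hij hj; omega
  | case3 i h1 => intro j hij hj; omega

lemma pyGetD_nat_succ (s : List Int) (j : Nat) :
    PySem.List.pyGetD s ((j : Int) + 1) 0 = s.getD (j + 1) 0 := by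
  have h : ((j : Int) + 1) = ((j + 1 : Nat) : Int) := by push_cast; ring
  rw [h, PySem.List.pyGetD_natCast]

-- A's search expressed as an existential over Nat peaks
lemma any_iff (s : List Int) (h3 : 3 ≤ s.length) :
    ((PySem.List.pyRange 0 ((s.length : Int) - 1) 1).any (fun i =>
      (PySem.List.pyRange 0 i 1).all
        (fun j => PySem.List.pyGetD s j 0 < PySem.List.pyGetD s (j + 1) 0) &&
      (PySem.List.pyRange i ((s.length : Int) - 1) 1).all
        (fun j => PySem.List.pyGetD s j 0 > PySem.List.pyGetD s (j + 1) 0)) = true)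
    ↔ ∃ p : Nat, p < s.length - 1 ∧ incP s p ∧ decP s p := by
  simp only [List.any_eq_true, Bool.and_eq_true, List.all_eq_true,
    PySem.List.mem_pyRange_one, decide_eq_true_eq, and_imp]
  constructor
  · rintro ⟨i, ⟨hi0, hin⟩, hall1, hall2⟩
    refine ⟨i.toNat, by omega, ?_, ?_⟩
    · intro j hj
      have := hall1 (j : Int) (by omega) (by omega)
      rwa [PySem.List.pyGetD_natCast, pyGetD_nat_succ] at this
    · intro j hjp hjn
      have := hall2 (j : Int) (by omega) (by omega)
      rwa [PySem.List.pyGetD_natCast, pyGetD_nat_succ] at this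
  · rintro ⟨p, hp, hinc, hdec⟩
    refine ⟨(p : Int), ⟨by omega, by omega⟩, ?_, ?_⟩
    · intro j hj0 hji
      obtain ⟨jn, rfl⟩ := Int.eq_ofNat_of_zero_le hj0
      rw [PySem.List.pyGetD_natCast, pyGetD_nat_succ]
      exact hinc jn (by omega)
    · intro j hjp hjn
      have hj0 : (0 : Int) ≤ j := by omega
      obtain ⟨jn, rfl⟩ := Int.eq_ofNat_of_zero_le hj0
      rw [PySem.List.pyGetD_natCast, pyGetD_nat_succ]
      exact hdec jn (by omega) (by omega)

-- A's answer characterised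
lemma Ayes_iff (s : List Int) (h3 : 3 ≤ s.length) :
    check s = "YES" ↔ ∃ p : Nat, p < s.length - 1 ∧ incP s p ∧ decP s p := by
  have h3' : ¬ ((s.length : Int) < 3) := by exact_mod_cast not_lt.mpr (by exact_mod_cast h3)
  unfold check
  rw [if_neg h3']
  split_ifs with hany
  · simp only [true_iff]
    exact (any_iff s h3).mp hany
  · constructor
    · intro h; exact absurd h (by decide)
    · intro hex; exact absurd ((any_iff s h3).mpr hex) hany

-- B's answer characterised
lemma Byes_iff (s : List Int) (h3 : 3 ≤ s.length) :
    check_alt s = "YES" ↔ upRun s 0 ≠ s.length - 1 ∧ downRun s (upRun s 0) = s.length - 1 := by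
  simp only [check_alt]
  have h3' : ¬ (s.length < 3) := by omega
  simp only [h3', if_false]
  split_ifs with h1 h2 <;> simp_all

lemma yes_iff_yes (s : List Int) (h3 : 3 ≤ s.length) :
    check s = "YES" ↔ check_alt s = "YES" := by
  rw [Ayes_iff s h3, Byes_iff s h3]
  constructor
  · rintro ⟨p, hp, hinc, hdec⟩
    have hup : upRun s 0 = p := by
      refine upRun_eq_of s p (by omega) (fun _ => not_lt.mpr (le_of_lt (hdec p le_rfl hp))) p 0 (by omega) (by omega) ?_
      intro j _ hj; exact hinc j hj
    refine ⟨by omega, ?_⟩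
    rw [hup]
    exact downRun_eq_of s (s.length - 1 - p) p rfl (by omega) hdec
  · rintro ⟨hne, hdown⟩
    have hle : upRun s 0 ≤ s.length - 1 := upRun_le s 0 (by omega)
    refine ⟨upRun s 0, by omega, ?_, ?_⟩
    · intro j hj; exact upRun_inc s 0 j (by omega) hj
    · exact downRun_dec s (upRun s 0) (by omega) hdown

lemma check_cases (s : List Int) : check s = "YES" ∨ check s = "NO" := by
  simp only [check]; split_ifs <;> simp

lemma check_alt_cases (s : List Int) : check_alt s = "YES" ∨ check_alt s = "NO" := by
  simp only [check_alt]; split_ifs <;> simp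

-- ===== VERDICT (by name: the statement is the Claim_ definition above) =====
theorem check_spec : Claim_equal_check := by
  intro s _
  show check s = check_alt s
  by_cases h3 : 3 ≤ s.length
  · have h := yes_iff_yes s h3
    rcases check_cases s with hA | hA <;> rcases check_alt_cases s with hB | hB <;>
      simp_all
  · have hA : check s = "NO" := by
      simp only [check]
      have : ((s.length : Int) < 3) := by exact_mod_cast (by omega : s.length < 3)
      simp [this]
    have hB : check_alt s = "NO" := by
      simp only [check_alt]
      simp [show s.length < 3 by omega]
    rw [hA, hB]
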